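-- pv_equiv track=rewrite | github.com/kkr010128/codebert | problem183/problem183_71.py | check_divide2
-- ===== SOURCE A (Python) =====
-- def check_divide2(n):
--     divide_nums = []
--     for K in range(2,n+1):
--         tmp = n
--         while True:
--             if tmp % K ==0:
--                 tmp = tmp // K
--             else:break
--         if tmp % K == 1:
--             divide_nums.append(K)
--     return divide_nums
-- ===== SOURCE B (Python) =====
-- def check_divide2(n):
--     # Enumerate divisors of n-1 and of n up to sqrt instead of scanning all K in 2..n.
--     if n < 2:
--         return []
--     res = set()
--
--     def strip_ok(d):
--         t = n
--         while t % d == 0: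
--             t //= d
--         return t % d == 1
--
--     def add_divisors(m, pred):
--         i = 1
--         while i * i <= m:
--             if m % i == 0:
--                 for d in (i, m // i):
--                     if d >= 2 and pred(d):
--                         res.add(d)
--             i += 1
--
--     add_divisors(n - 1, lambda d: True)   # K | n-1  =>  n % K == 1 automatically
--     add_divisors(n, strip_ok)             # K | n: strip factors of K, test remainder 1
--     return sorted(res)
-- ===== Notes on version B (the rewrite author's own statement) =====
-- stated objective: faster
-- what changed: Instead of testing every K in 2..n, B enumerates the divisors of n-1 (which always satisfy the condition) and of n (tested by stripping factors) up to sqrt, collects them in a set and sorts.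
import Mathlib
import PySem

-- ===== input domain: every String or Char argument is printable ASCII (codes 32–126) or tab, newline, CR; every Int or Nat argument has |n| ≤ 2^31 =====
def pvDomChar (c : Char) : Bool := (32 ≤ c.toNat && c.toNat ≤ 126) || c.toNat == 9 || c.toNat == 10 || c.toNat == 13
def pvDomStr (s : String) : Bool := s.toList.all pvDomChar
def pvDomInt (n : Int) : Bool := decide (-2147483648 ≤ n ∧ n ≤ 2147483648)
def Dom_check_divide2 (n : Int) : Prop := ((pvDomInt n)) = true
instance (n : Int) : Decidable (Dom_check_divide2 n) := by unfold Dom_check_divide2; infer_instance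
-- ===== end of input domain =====

-- B enumerates the divisors of n-1 and of n up to sqrt instead of scanning all K in 2..n (faster).

-- ===== PORT A =====
-- shared inner loop of both Pythons: `while t % K == 0: t //= K`.
-- The guards 2 ≤ K and 0 < t are totality guards only: every call in either port
-- has 2 ≤ K and t = n ≥ 2 (and t stays positive), exactly as in the Python.
def strip (t K : Int) : Int :=
  if h : PySem.Int.mod t K = 0 ∧ 2 ≤ K ∧ 0 < t then strip (PySem.Int.floordiv t K) K else t
termination_by t.toNat
decreasing_by
  have h2 := h.2.1; have h3 := h.2.2
  have he : PySem.Int.floordiv t K = t / K := PySem.Int.floordiv_eq_ediv_of_pos (by omega)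
  rw [he]
  have hlt : t / K < t := Int.ediv_lt_of_lt_mul (by omega) (by nlinarith)
  have hnn : 0 ≤ t / K := Int.ediv_nonneg (by omega) (by omega)
  omega

def check_divide2 (n : Int) : List Int :=
  (PySem.List.pyRange 2 (n + 1) 1).foldl
    (fun acc K => if PySem.Int.mod (strip n K) K = 1 then acc ++ [K] else acc) []

-- ===== PORT B =====
def stripOk (n d : Int) : Bool := PySem.Int.mod (strip n d) d = 1

-- body of B's while-loop: `if m % i == 0: for d in (i, m//i): if d >= 2 and pred(d): res.add(d)`
def divStep (m : Int) (pred : Int → Bool) (i : Int) (res : PySem.Set Int) : PySem.Set Int :=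
  if PySem.Int.mod m i = 0 then
    let q := PySem.Int.floordiv m i
    let resA := if 2 ≤ i ∧ pred i = true then PySem.Set.add res i else res
    if 2 ≤ q ∧ pred q = true then PySem.Set.add resA q else resA
  else res

-- `i = 1; while i * i <= m: <divStep>; i += 1`  (the guard 1 ≤ i is a totality guard; i starts at 1)
def divLoop (m : Int) (pred : Int → Bool) (i : Int) (res : PySem.Set Int) : PySem.Set Int :=
  if h : 1 ≤ i ∧ i * i ≤ m then divLoop m pred (i + 1) (divStep m pred i res) else res
termination_by (m + 1 - i).toNat
decreasing_by
  have h2 := h.2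
  have : i ≤ m := by nlinarith
  omega

def check_divide2_alt (n : Int) : List Int :=
  if n < 2 then []
  else
    let res := divLoop (n - 1) (fun _ => true) 1 PySem.Set.empty
    let res := divLoop n (fun d => stripOk n d) 1 res
    PySem.List.sorted res (fun x => x) false

-- ===== PRECONDITION & SPEC =====
def Spec_check_divide2 (n : Int) (out : List Int) : Prop := out = check_divide2_alt n
instance (n : Int) (out : List Int) : Decidable (Spec_check_divide2 n out) := by unfold Spec_check_divide2; infer_instance

-- ===== CLAIM (what is proved, stated in full; the proofs are below) =====
def Claim_equal_check_divide2 : Prop := ∀ (n : Int), Dom_check_divide2 n → Spec_check_divide2 n (check_divide2 n)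

-- ===== LEMMAS AND PROOFS =====

-- A is the filter of the range by the strip condition
theorem checkA_eq_filter (n : Int) :
    check_divide2 n =
      (PySem.List.pyRange 2 (n + 1) 1).filter
        (fun K => decide (PySem.Int.mod (strip n K) K = 1)) := by
  unfold check_divide2
  have := PySem.List.foldl_append_if
    (p := fun K => decide (PySem.Int.mod (strip n K) K = 1)) (f := fun K => K)
    (PySem.List.pyRange 2 (n + 1) 1) []
  simpa using this

theorem mem_divStep (m : Int) (pred : Int → Bool) (i : Int) (res : PySem.Set Int) (x : Int) :
    x ∈ divStep m pred i res ↔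
      x ∈ res ∨ (PySem.Int.mod m i = 0 ∧ (x = i ∨ x = PySem.Int.floordiv m i) ∧
                 2 ≤ x ∧ pred x = true) := by
  simp only [divStep]
  split_ifs with hm hA hB <;> simp only [PySem.Set.mem_add, hm] <;> aesop

theorem nodup_divStep (m : Int) (pred : Int → Bool) (i : Int) (res : PySem.Set Int)
    (h : res.Nodup) : (divStep m pred i res).Nodup := by
  simp only [divStep]
  split_ifs <;>
    first | exact PySem.Set.nodup_add _ _ (PySem.Set.nodup_add _ _ h)
          | exact PySem.Set.nodup_add _ _ h
          | exact h

theorem mem_divLoop (m : Int) (pred : Int → Bool) (i : Int) (res : PySem.Set Int) (x : Int) :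
    1 ≤ i →
    (x ∈ divLoop m pred i res ↔
      x ∈ res ∨ ∃ j, i ≤ j ∧ j * j ≤ m ∧ PySem.Int.mod m j = 0 ∧
        (x = j ∨ x = PySem.Int.floordiv m j) ∧ 2 ≤ x ∧ pred x = true) := by
  induction i, res using divLoop.induct (m := m) (pred := pred) with
  | case1 i res h ih =>
    intro _
    rw [divLoop, dif_pos h, ih (by omega), mem_divStep]
    constructor
    · rintro ((hr | hstep) | ⟨j, hj, rest⟩)
      · exact Or.inl hr
      · exact Or.inr ⟨i, le_refl i, h.2, hstep.1, hstep.2⟩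
      · exact Or.inr ⟨j, by omega, rest⟩
    · rintro (hr | ⟨j, hij, hjj, hmod, hx, h2x, hpx⟩)
      · exact Or.inl (Or.inl hr)
      · rcases eq_or_lt_of_le hij with rfl | hlt
        · exact Or.inl (Or.inr ⟨hmod, hx, h2x, hpx⟩)
        · exact Or.inr ⟨j, by omega, hjj, hmod, hx, h2x, hpx⟩
  | case2 i res h =>
    intro hi
    rw [divLoop, dif_neg h]
    constructor
    · exact Or.inl
    · rintro (hr | ⟨j, hij, hjj, -⟩)
      · exact hr
      · exfalso
        have him : ¬ (i * i ≤ m) := fun hc => h ⟨hi, hc⟩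
        exact him (by nlinarith)

theorem nodup_divLoop (m : Int) (pred : Int → Bool) (i : Int) (res : PySem.Set Int) :
    res.Nodup → (divLoop m pred i res).Nodup := by
  induction i, res using divLoop.induct (m := m) (pred := pred) with
  | case1 i res hg ih =>
    intro h
    rw [divLoop, dif_pos hg]
    exact ih (nodup_divStep m pred i res h)
  | case2 i res hg =>
    intro h
    rw [divLoop, dif_neg hg]
    exact h

-- sqrt-bounded divisor-pair enumeration hits exactly the divisors
theorem exists_sqrt_divisor (m x : Int) (hm : 1 ≤ m) :
    (∃ j, 1 ≤ j ∧ j * j ≤ m ∧ PySem.Int.mod m j = 0 ∧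
        (x = j ∨ x = PySem.Int.floordiv m j)) ↔ (x ∣ m ∧ 1 ≤ x) := by
  constructor
  · rintro ⟨j, hj1, hjj, hmod, hx⟩
    have hdvd : j ∣ m := (PySem.Int.mod_eq_zero_iff_dvd m j).mp hmod
    have hfd : PySem.Int.floordiv m j = m / j := PySem.Int.floordiv_eq_ediv_of_pos (by omega)
    rcases hx with rfl | rfl
    · exact ⟨hdvd, hj1⟩
    · obtain ⟨c, rfl⟩ := hdvd
      rw [hfd, Int.mul_ediv_cancel_left _ (by omega)]
      constructor
      · exact ⟨j, mul_comm j c⟩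
      · nlinarith
  · rintro ⟨hdvd, hx1⟩
    by_cases hsq : x * x ≤ m
    · exact ⟨x, hx1, hsq, (PySem.Int.mod_eq_zero_iff_dvd m x).mpr hdvd, Or.inl rfl⟩
    · obtain ⟨c, hc⟩ := hdvd
      have hc1 : 1 ≤ c := by nlinarith
      refine ⟨c, hc1, by nlinarith,
        (PySem.Int.mod_eq_zero_iff_dvd m c).mpr ⟨x, by rw [hc]; ring⟩, Or.inr ?_⟩
      rw [PySem.Int.floordiv_eq_ediv_of_pos (by omega), hc, mul_comm x c,
        Int.mul_ediv_cancel_left _ (by omega)]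

-- strip leaves n unchanged when K does not divide n
theorem strip_of_not_dvd (n K : Int) (h : ¬ K ∣ n) : strip n K = n := by
  rw [strip, dif_neg]
  rintro ⟨hc, -⟩
  exact h ((PySem.Int.mod_eq_zero_iff_dvd n K).mp hc)

-- A's success condition, for 2 ≤ x, equals membership in B's union of divisor sets
theorem cond_iff (n x : Int) (hn : 2 ≤ n) (hx : 2 ≤ x) :
    (x ≤ n ∧ PySem.Int.mod (strip n x) x = 1) ↔
      (x ∣ (n - 1)) ∨ (x ∣ n ∧ PySem.Int.mod (strip n x) x = 1) := by
  constructor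
  · rintro ⟨hxn, hcond⟩
    by_cases hd : x ∣ n
    · exact Or.inr ⟨hd, hcond⟩
    · left
      rw [strip_of_not_dvd n x hd, PySem.Int.mod_eq_emod_of_pos (by omega)] at hcond
      have h1 : (1 : Int) % x = 1 := Int.emod_eq_of_lt (by omega) (by omega)
      have h0 : (n - 1) % x = 0 := by rw [Int.sub_emod, hcond, h1]; simp
      exact Int.dvd_of_emod_eq_zero h0
  · rintro (hd | ⟨hd, hcond⟩)
    · have hnd : ¬ x ∣ n := by
        intro hdn
        have h1 : x ∣ 1 := by simpa using Int.dvd_sub hdn hd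
        have := Int.le_of_dvd (by omega) h1
        omega
      have hxn1 : x ≤ n - 1 := Int.le_of_dvd (by omega) hd
      refine ⟨by omega, ?_⟩
      rw [strip_of_not_dvd n x hnd, PySem.Int.mod_eq_emod_of_pos (by omega)]
      obtain ⟨c, hc⟩ := hd
      have hn1 : n = 1 + x * c := by omega
      rw [hn1, Int.add_mul_emod_self_left, Int.emod_eq_of_lt (by omega) (by omega)]
    · exact ⟨Int.le_of_dvd (by omega) hd, hcond⟩

-- membership in B's collected set, for n ≥ 2
theorem mem_res_iff (n x : Int) (hn : 2 ≤ n) :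
    (x ∈ divLoop n (fun d => stripOk n d) 1 (divLoop (n - 1) (fun _ => true) 1 PySem.Set.empty)) ↔
      (2 ≤ x ∧ x ∣ (n - 1)) ∨ (2 ≤ x ∧ x ∣ n ∧ PySem.Int.mod (strip n x) x = 1) := by
  rw [mem_divLoop _ _ _ _ _ (by omega), mem_divLoop _ _ _ _ _ (by omega)]
  have e1 := exists_sqrt_divisor (n - 1) x (by omega)
  have e2 := exists_sqrt_divisor n x (by omega)
  constructor
  · rintro ((h0 | ⟨j, h1, h2, h3, h4, h5, -⟩) | ⟨j, h1, h2, h3, h4, h5, h6⟩)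
    · cases h0
    · exact Or.inl ⟨h5, (e1.mp ⟨j, h1, h2, h3, h4⟩).1⟩
    · refine Or.inr ⟨h5, (e2.mp ⟨j, h1, h2, h3, h4⟩).1, ?_⟩
      simpa [stripOk] using h6
  · rintro (⟨h2x, hd⟩ | ⟨h2x, hd, hc⟩)
    · obtain ⟨j, h1, h2, h3, h4⟩ := e1.mpr ⟨hd, by omega⟩
      exact Or.inl (Or.inr ⟨j, h1, h2, h3, h4, h2x, rfl⟩)
    · obtain ⟨j, h1, h2, h3, h4⟩ := e2.mpr ⟨hd, by omega⟩
      exact Or.inr ⟨j, h1, h2, h3, h4, h2x, by simp [stripOk, hc]⟩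

-- ===== VERDICT (by name: the statement is the Claim_ definition above) =====
theorem check_divide2_spec : Claim_equal_check_divide2 := by
  unfold Claim_equal_check_divide2
  intro n _
  unfold Spec_check_divide2
  by_cases hn : n < 2
  · rw [checkA_eq_filter, PySem.List.pyRange_one_eq_nil (by omega), check_divide2_alt, if_pos hn]
    rfl
  · rw [not_lt] at hn
    rw [checkA_eq_filter, check_divide2_alt, if_neg (by omega)]
    have hpair : ((PySem.List.pyRange 2 (n + 1) 1).filter
        (fun K => decide (PySem.Int.mod (strip n K) K = 1))).Pairwise (· < ·) :=
      (PySem.List.pairwise_lt_pyRange_one 2 (n + 1)).filter _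
    refine (PySem.List.sorted_eq_of_perm_of_pairwise_lt _ _ (fun x : Int => x) ?_ hpair).symm
    refine (List.perm_ext_iff_of_nodup ?_ ?_).mpr ?_
    · exact (PySem.List.nodup_pyRange_one 2 (n + 1)).filter _
    · exact nodup_divLoop _ _ _ _ (nodup_divLoop _ _ _ _ List.nodup_nil)
    · intro a
      simp only [List.mem_filter, PySem.List.mem_pyRange_one, decide_eq_true_iff]
      rw [mem_res_iff n a hn]
      constructor
      · rintro ⟨⟨h2a, hlt⟩, hc⟩
        rcases (cond_iff n a hn h2a).mp ⟨by omega, hc⟩ with h | h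
        · exact Or.inl ⟨h2a, h⟩
        · exact Or.inr ⟨h2a, h.1, h.2⟩
      · rintro (⟨h2a, hd⟩ | ⟨h2a, hd, hc⟩)
        · have := (cond_iff n a hn h2a).mpr (Or.inl hd)
          exact ⟨⟨h2a, by omega⟩, this.2⟩
        · have := (cond_iff n a hn h2a).mpr (Or.inr ⟨hd, hc⟩)
          exact ⟨⟨h2a, by omega⟩, this.2⟩
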